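-- pv_equiv track=rewrite | github.com/madebychangong/newsoom3 | 최적화/analyze_first_paragraph.py | get_first_paragraph
-- ===== SOURCE A (Python) =====
-- def get_first_paragraph(text):
--     """첫 문단 추출 (빈 줄로 구분)"""
--     if not text:
--         return ""
--
--     # 제목 제거
--     lines = [line for line in text.split('\n') if not line.strip().startswith('#')]
--     text_no_title = '\n'.join(lines)
--
--     # 첫 문단 추출 (빈 줄 전까지)
--     paragraphs = text_no_title.split('\n\n')
--     if paragraphs:
--         return paragraphs[0].strip()
--     return text_no_title.strip()
-- ===== SOURCE B (Python) =====
-- def get_first_paragraph(text):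
--     """First paragraph in one fused early-stopping scan over the lines."""
--     if not text:
--         return ""
--     buf = []
--     for line in text.split('\n'):
--         if line.strip().startswith('#'):
--             continue
--         if line == '' and buf:
--             break
--         buf.append(line)
--     return '\n'.join(buf).strip()
-- ===== Notes on version B (the rewrite author's own statement) =====
-- stated objective: simpler
-- what changed: Replaces A's pipeline (filter title lines, rejoin, split on blank-line separators, take the first piece) with a single early-stopping scan over the lines that skips title lines and breaks at the first empty line once the buffer is nonempty.
import Mathlib
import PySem

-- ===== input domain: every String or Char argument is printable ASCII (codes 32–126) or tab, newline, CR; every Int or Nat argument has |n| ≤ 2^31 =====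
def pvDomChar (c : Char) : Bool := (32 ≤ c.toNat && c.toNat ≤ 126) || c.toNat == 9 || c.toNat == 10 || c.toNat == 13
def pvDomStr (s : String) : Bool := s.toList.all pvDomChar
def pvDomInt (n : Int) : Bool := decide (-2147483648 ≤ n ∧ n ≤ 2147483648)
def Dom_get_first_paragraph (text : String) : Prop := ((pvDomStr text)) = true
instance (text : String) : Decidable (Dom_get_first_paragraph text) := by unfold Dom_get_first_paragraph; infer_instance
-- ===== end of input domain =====

-- B fuses A's filter/rejoin/split-into-paragraphs/take-first chain into one early-stopping
-- scan over the lines (simpler decomposition; same return value, proved below).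


-- ===== PORT A =====
def get_first_paragraph (text : String) : String :=
  if text = "" then ""
  else
    let lines := (PySem.Chars.splitOn text.toList ['\n']).filter
      (fun line => !(PySem.Chars.startswith (PySem.Chars.strip line) ['#']))
    let text_no_title := PySem.Chars.join ['\n'] lines
    let paragraphs := PySem.Chars.splitOn text_no_title ['\n', '\n']
    match paragraphs with
    | p :: _ => String.ofList (PySem.Chars.strip p)
    | [] => String.ofList (PySem.Chars.strip text_no_title)

-- ===== PORT B =====
-- the for-loop of Source B: skip title lines, break on an empty line once the buffer is nonempty
def pvAltLoop (buf : List (List Char)) : List (List Char) → List (List Char)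
  | [] => buf
  | line :: rest =>
    if PySem.Chars.startswith (PySem.Chars.strip line) ['#'] then pvAltLoop buf rest
    else if line = [] ∧ buf ≠ [] then buf
    else pvAltLoop (buf ++ [line]) rest

def get_first_paragraph_alt (text : String) : String :=
  if text = "" then ""
  else String.ofList (PySem.Chars.strip (PySem.Chars.join ['\n']
    (pvAltLoop [] (PySem.Chars.splitOn text.toList ['\n']))))

-- ===== PRECONDITION & SPEC =====
def Spec_get_first_paragraph (text : String) (out : String) : Prop := out = get_first_paragraph_alt text
instance (text : String) (out : String) : Decidable (Spec_get_first_paragraph text out) := by unfold Spec_get_first_paragraph; infer_instance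

-- ===== CLAIM (what is proved, stated in full; the proofs are below) =====
def Claim_equal_get_first_paragraph : Prop := ∀ (text : String), Dom_get_first_paragraph text → Spec_get_first_paragraph text (get_first_paragraph text)

-- ===== LEMMAS AND PROOFS =====

-- first piece of split(sep): chars up to the first occurrence of sep
def pvFirstSeg (sep : List Char) : List Char → List Char
  | [] => []
  | c :: rest => if sep.isPrefixOf (c :: rest) then [] else c :: pvFirstSeg sep rest

-- lines B keeps once its buffer is nonempty: up to the first empty line
def pvTakeB : List (List Char) → List (List Char)
  | [] => []
  | l :: rest => if l = [] then [] else l :: pvTakeB rest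

-- Source B's loop with the `continue` hoisted out: pure break/append loop on the filtered lines
def pvPureLoop (buf : List (List Char)) : List (List Char) → List (List Char)
  | [] => buf
  | line :: rest => if line = [] ∧ buf ≠ [] then buf else pvPureLoop (buf ++ [line]) rest

theorem pvAltLoop_eq_filter (ls : List (List Char)) : ∀ buf, pvAltLoop buf ls =
    pvPureLoop buf (ls.filter (fun line => !(PySem.Chars.startswith (PySem.Chars.strip line) ['#']))) := by
  induction ls with
  | nil => intro buf; rfl
  | cons l rest ih =>
    intro buf
    by_cases h : PySem.Chars.startswith (PySem.Chars.strip l) ['#'] = true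
    · simp [pvAltLoop, pvPureLoop, h, ih]
    · simp only [Bool.not_eq_true] at h
      by_cases hb : l = [] ∧ buf ≠ []
      · obtain ⟨hl0, hbne⟩ := hb
        subst hl0
        simp [pvAltLoop, pvPureLoop, h, hbne]
      · simp [pvAltLoop, pvPureLoop, h, hb, ih]

theorem pvPureLoop_ne_nil (ls : List (List Char)) : ∀ buf, buf ≠ [] →
    pvPureLoop buf ls = buf ++ pvTakeB ls := by
  induction ls with
  | nil => intro buf _; simp [pvPureLoop, pvTakeB]
  | cons l rest ih =>
    intro buf hb
    by_cases hl : l = []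
    · simp [pvPureLoop, pvTakeB, hl, hb]
    · simp [pvPureLoop, pvTakeB, hl, hb, ih (buf ++ [l]) (by simp)]

theorem pvGo_acc (sep : List Char) : ∀ (fuel : Nat) (l cur : List Char) (acc : List (List Char)),
    PySem.Chars.splitOn.go sep fuel l cur acc = acc.reverse ++ PySem.Chars.splitOn.go sep fuel l cur [] := by
  intro fuel
  induction fuel with
  | zero => intro l cur acc; rw [PySem.Chars.splitOn.go.eq_def, PySem.Chars.splitOn.go.eq_def]; simp
  | succ f ih =>
    intro l cur acc
    cases l with
    | nil => rw [PySem.Chars.splitOn.go.eq_def, PySem.Chars.splitOn.go.eq_def]; simp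
    | cons c rest =>
      rw [PySem.Chars.splitOn.go.eq_def]
      conv_rhs => rw [PySem.Chars.splitOn.go.eq_def]
      by_cases hp : sep.isPrefixOf (c :: rest) = true
      · simp only [hp, if_true]
        rw [ih _ _ (cur.reverse :: acc), ih _ _ [cur.reverse]]
        simp
      · simp only [hp, if_false]
        exact ih _ _ acc

theorem pvGo_head (sep : List Char) (hsep : sep ≠ []) :
    ∀ (fuel : Nat) (l cur : List Char), l.length ≤ fuel →
    ∃ t, PySem.Chars.splitOn.go sep fuel l cur [] = (cur.reverse ++ pvFirstSeg sep l) :: t := by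
  intro fuel
  induction fuel with
  | zero =>
    intro l cur hl
    have : l = [] := by cases l with | nil => rfl | cons a b => simp at hl
    subst this
    exact ⟨[], by rw [PySem.Chars.splitOn.go.eq_def]; simp [pvFirstSeg]⟩
  | succ f ih =>
    intro l cur hl
    cases l with
    | nil => exact ⟨[], by rw [PySem.Chars.splitOn.go.eq_def]; simp [pvFirstSeg]⟩
    | cons c rest =>
      rw [PySem.Chars.splitOn.go.eq_def]
      by_cases hp : sep.isPrefixOf (c :: rest) = true
      · simp only [hp, if_true]
        rw [pvGo_acc]
        obtain ⟨t, ht⟩ := ih (List.drop sep.length (c :: rest)) []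
          (by
            have h1 : 1 ≤ sep.length := by
              cases sep with | nil => exact absurd rfl hsep | cons a b => simp
            simp only [List.length_drop, List.length_cons] at *
            omega)
        refine ⟨pvFirstSeg sep (List.drop sep.length (c :: rest)) :: t, ?_⟩
        rw [ht]
        simp [pvFirstSeg, hp]
      · simp only [hp, if_false]
        obtain ⟨t, ht⟩ := ih rest (c :: cur) (by simp at hl ⊢; omega)
        refine ⟨t, ?_⟩
        rw [ht]
        simp [pvFirstSeg, hp]

theorem pvGo_no_nl : ∀ (fuel : Nat) (l cur : List Char) (acc : List (List Char)),
    l.length ≤ fuel → '\n' ∉ cur → (∀ p ∈ acc, '\n' ∉ p) →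
    ∀ p ∈ PySem.Chars.splitOn.go ['\n'] fuel l cur acc, '\n' ∉ p := by
  intro fuel
  induction fuel with
  | zero =>
    intro l cur acc hl hc ha p hp
    have : l = [] := by cases l with | nil => rfl | cons a b => simp at hl
    subst this
    rw [PySem.Chars.splitOn.go.eq_def] at hp
    simp at hp
    rcases hp with hp | hp
    · exact ha p hp
    · subst hp; simpa using hc
  | succ f ih =>
    intro l cur acc hl hc ha p hp
    cases l with
    | nil =>
      rw [PySem.Chars.splitOn.go.eq_def] at hp
      simp at hp
      rcases hp with hp | hp
      · exact ha p hp
      · subst hp; simpa using hc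
    | cons c rest =>
      rw [PySem.Chars.splitOn.go.eq_def] at hp
      by_cases hpre : List.isPrefixOf ['\n'] (c :: rest) = true
      · simp only [hpre, if_true] at hp
        refine ih _ _ _ (by simp at hl ⊢; omega) (by simp) ?_ p hp
        intro q hq
        simp at hq
        rcases hq with hq | hq
        · subst hq; simpa using hc
        · exact ha q hq
      · simp only [hpre, if_false] at hp
        have hcne : c ≠ '\n' := by
          intro h; subst h; simp [List.isPrefixOf] at hpre
        refine ih _ _ _ (by simp at hl ⊢; omega) ?_ ha p hp
        intro h
        simp at h
        rcases h with h | h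
        · exact hcne h.symm
        · exact hc h

theorem pvFirstSeg_append (l t : List Char) (hl : '\n' ∉ l) :
    pvFirstSeg ['\n', '\n'] (l ++ t) = l ++ pvFirstSeg ['\n', '\n'] t := by
  induction l with
  | nil => simp
  | cons c cs ih =>
    have hc : c ≠ '\n' := by intro h; exact hl (h ▸ List.mem_cons_self)
    have hnp : List.isPrefixOf ['\n', '\n'] (c :: (cs ++ t)) = false := by
      simp [List.isPrefixOf, Ne.symm hc]
    simp only [List.cons_append, pvFirstSeg, hnp, Bool.false_eq_true, if_false]
    rw [ih (fun h => hl (List.mem_cons_of_mem _ h))]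

theorem pvJoin_cons_cons (x y : List Char) (zs : List (List Char)) :
    PySem.Chars.join ['\n'] (x :: y :: zs) = x ++ '\n' :: PySem.Chars.join ['\n'] (y :: zs) := by
  simp [PySem.Chars.join, List.intercalate, List.intersperse]

theorem pvJoin_singleton (x : List Char) : PySem.Chars.join ['\n'] [x] = x := by
  simp [PySem.Chars.join, List.intercalate]

theorem pvMain : ∀ (rest : List (List Char)) (l : List Char), '\n' ∉ l → (∀ m ∈ rest, '\n' ∉ m) →
    pvFirstSeg ['\n', '\n'] (PySem.Chars.join ['\n'] (l :: rest)) = PySem.Chars.join ['\n'] (l :: pvTakeB rest) ∨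
    pvFirstSeg ['\n', '\n'] (PySem.Chars.join ['\n'] (l :: rest)) = PySem.Chars.join ['\n'] (l :: pvTakeB rest) ++ ['\n'] := by
  intro rest
  induction rest with
  | nil =>
    intro l hl _
    left
    have h2 := pvFirstSeg_append l [] hl
    simp only [List.append_nil, pvFirstSeg] at h2
    simp only [pvTakeB, pvJoin_singleton, h2]
  | cons m rest' ih =>
    intro l hl hm
    rw [pvJoin_cons_cons, pvFirstSeg_append l _ hl]
    by_cases hme : m = []
    · subst hme
      cases rest' with
      | nil =>
        right
        rw [pvJoin_singleton]
        simp [pvTakeB, pvJoin_singleton, pvFirstSeg, List.isPrefixOf]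
      | cons m' rest'' =>
        left
        rw [pvJoin_cons_cons]
        have : pvFirstSeg ['\n', '\n'] ('\n' :: ([] ++ '\n' :: PySem.Chars.join ['\n'] (m' :: rest''))) = [] := by
          simp [pvFirstSeg, List.isPrefixOf]
        simp only [this]
        simp [pvTakeB, pvJoin_singleton]
    · have hmn : '\n' ∉ m := hm m List.mem_cons_self
      obtain ⟨c, cs, hc⟩ : ∃ c cs, m = c :: cs := by
        cases m with | nil => exact absurd rfl hme | cons c cs => exact ⟨c, cs, rfl⟩
      have hcn : c ≠ '\n' := by intro h; exact hmn (hc ▸ h ▸ List.mem_cons_self)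
      have hstep : pvFirstSeg ['\n', '\n'] ('\n' :: PySem.Chars.join ['\n'] (m :: rest')) =
          '\n' :: pvFirstSeg ['\n', '\n'] (PySem.Chars.join ['\n'] (m :: rest')) := by
        have hj : ∃ w, PySem.Chars.join ['\n'] (m :: rest') = c :: w := by
          cases rest' with
          | nil => exact ⟨cs, by rw [pvJoin_singleton, hc]⟩
          | cons y ys => exact ⟨cs ++ '\n' :: PySem.Chars.join ['\n'] (y :: ys), by rw [pvJoin_cons_cons, hc]; simp⟩
        obtain ⟨w, hw⟩ := hj
        rw [hw]
        have : List.isPrefixOf ['\n', '\n'] ('\n' :: c :: w) = false := by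
          simp [List.isPrefixOf, Ne.symm hcn]
        conv_lhs => rw [pvFirstSeg]
        simp [this]
      rw [hstep]
      have hTake : pvTakeB (m :: rest') = m :: pvTakeB rest' := by simp [pvTakeB, hme]
      rw [hTake, pvJoin_cons_cons]
      rcases ih m hmn (fun x hx => hm x (List.mem_cons_of_mem _ hx)) with h | h
      · left; rw [h]
      · right; rw [h]; simp

theorem pvStrip_newline (x : List Char) : PySem.Chars.strip (x ++ ['\n']) = PySem.Chars.strip x := by
  unfold PySem.Chars.strip PySem.Chars.lstrip PySem.Chars.rstrip
  rw [List.dropWhile_append]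
  by_cases h : (List.dropWhile PySem.Chars.isspace x).isEmpty
  · have hx : List.dropWhile PySem.Chars.isspace x = [] := by simpa [List.isEmpty_iff] using h
    simp [h, hx, List.dropWhile, show PySem.Chars.isspace '\n' = true from by decide]
  · simp only [Bool.not_eq_true] at h
    simp only [h, Bool.false_eq_true, if_false, List.reverse_append]
    simp [List.dropWhile, show PySem.Chars.isspace '\n' = true from by decide]

-- the filtered lines of A (= the surviving lines of B)
theorem pvKey (text : String) :
    get_first_paragraph text = get_first_paragraph_alt text := by
  by_cases he : text = ""
  · simp [get_first_paragraph, get_first_paragraph_alt, he]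
  · unfold get_first_paragraph get_first_paragraph_alt
    simp only [he, if_false]
    set lines := PySem.Chars.splitOn text.toList ['\n'] with hlines
    have hfree : ∀ p ∈ lines, '\n' ∉ p := by
      intro p hp
      exact pvGo_no_nl (text.toList.length + 1) text.toList [] [] (by omega) (by simp) (by simp) p hp
    set fs := lines.filter (fun line => !(PySem.Chars.startswith (PySem.Chars.strip line) ['#'])) with hfs
    have hfsfree : ∀ p ∈ fs, '\n' ∉ p := fun p hp => hfree p (List.mem_of_mem_filter hp)
    have hB : pvAltLoop [] lines = pvPureLoop [] fs := pvAltLoop_eq_filter lines []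
    set j := PySem.Chars.join ['\n'] fs with hj
    obtain ⟨t, ht⟩ := pvGo_head ['\n', '\n'] (by simp) (j.length + 1) j [] (by omega)
    have hsplit : PySem.Chars.splitOn j ['\n', '\n'] = pvFirstSeg ['\n', '\n'] j :: t := by
      rw [PySem.Chars.splitOn]; rw [ht]; simp
    rw [hB, hsplit]
    cases hfsc : fs with
    | nil =>
      simp [hfsc] at hj
      simp [hj, pvFirstSeg, pvPureLoop, PySem.Chars.join, List.intercalate]
    | cons l rest =>
      have hln : '\n' ∉ l := hfsfree l (hfsc ▸ List.mem_cons_self)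
      have hrn : ∀ m ∈ rest, '\n' ∉ m := fun m hm => hfsfree m (hfsc ▸ List.mem_cons_of_mem _ hm)
      have hPL : pvPureLoop [] (l :: rest) = l :: pvTakeB rest := by
        have : pvPureLoop [] (l :: rest) = pvPureLoop [l] rest := by simp [pvPureLoop]
        rw [this, pvPureLoop_ne_nil rest [l] (by simp)]
        simp
      rw [hfsc] at hj
      rw [hPL]
      rcases pvMain rest l hln hrn with h | h
      · rw [hj, h]
      · rw [hj, h]
        show String.ofList (PySem.Chars.strip (PySem.Chars.join ['\n'] (l :: pvTakeB rest) ++ ['\n'])) =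
          String.ofList (PySem.Chars.strip (PySem.Chars.join ['\n'] (l :: pvTakeB rest)))
        rw [pvStrip_newline]

-- ===== VERDICT (by name: the statement is the Claim_ definition above) =====
theorem get_first_paragraph_spec : Claim_equal_get_first_paragraph := by
  intro text _
  unfold Spec_get_first_paragraph
  exact pvKey text
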